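-- pv_equiv track=rewrite | github.com/ANKANA-MONDAL-MCA-A-2024-26-09-UEMK/python | find_nth_term9.py | find_nth_term
-- ===== SOURCE A (Python) =====
-- import string
--
-- def find_nth_term(n):
--     # Create the alphabet list
--     alphabet = string.ascii_lowercase
--
--     # Initialize the count for the current letter's repetition
--     count = 1
--     i = 0
--
--     # Determine which letter corresponds to the nth term
--     while n > count:
--         n -= count  # Decrease n by the number of times the current letter repeats
--         count += 1  # Next letter will repeat count+1 times
--         i += 1  # Move to the next letter in the alphabet
--
--     # Return the corresponding letter
--     return alphabet[i]
-- ===== SOURCE B (Python) =====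
-- import string
--
-- def _isqrt(m):
--     # exact integer square root by Newton's method (no floats)
--     x = m
--     y = (x + 1) // 2
--     while y < x:
--         x = y
--         y = (x + m // x) // 2
--     return x
--
-- def find_nth_term(n):
--     if n <= 1:
--         return string.ascii_lowercase[0]
--     # smallest k with k*(k+1)//2 >= n is k = ceil((sqrt(8n+1)-1)/2) = (isqrt(8n-7)+1)//2
--     k = (_isqrt(8 * n - 7) + 1) // 2
--     return string.ascii_lowercase[k - 1]
-- ===== Notes on version B (the rewrite author's own statement) =====
-- stated objective: alternative
-- what changed: Replaces the subtraction while-loop that walks through triangular numbers with a closed-form index k = (isqrt(8n-7)+1)//2 computed via an exact Newton integer square root.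
import Mathlib
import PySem

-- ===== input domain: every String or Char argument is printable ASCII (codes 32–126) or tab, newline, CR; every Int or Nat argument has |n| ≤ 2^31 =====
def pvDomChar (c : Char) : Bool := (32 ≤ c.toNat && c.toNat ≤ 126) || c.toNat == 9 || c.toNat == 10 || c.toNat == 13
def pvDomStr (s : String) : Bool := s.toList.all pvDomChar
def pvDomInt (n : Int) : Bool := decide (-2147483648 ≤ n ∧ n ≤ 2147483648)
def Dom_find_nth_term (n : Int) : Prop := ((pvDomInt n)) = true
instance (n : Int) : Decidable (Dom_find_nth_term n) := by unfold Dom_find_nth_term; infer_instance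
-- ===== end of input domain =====

-- B changes the algorithm: the closed-form inverse-triangular index via an exact integer
-- square root (Newton's method) replaces A's subtraction loop (objective: alternative).

-- ===== PORT A =====
-- A's while loop: state (n, count, i); fuel bounds the iterations (n shrinks by count ≥ 1
-- each step, so n.toNat iterations always suffice) — fuel only makes the loop total.
def findLoopA : Nat → Int → Int → Int → Int
  | 0, _, _, i => i
  | fuel + 1, n, count, i =>
      if n > count then findLoopA fuel (n - count) (count + 1) (i + 1) else i

def find_nth_term (n : Int) : String :=
  let alphabet := "abcdefghijklmnopqrstuvwxyz"
  let i := findLoopA n.toNat n 1 0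
  -- alphabet[i]: Python raises IndexError when out of range; Pre_ excludes those inputs
  ((PySem.Str.pyGet? alphabet i).map (fun c => String.mk [c])).getD ""

-- ===== PORT B =====
-- Newton-iteration integer square root (Source B's _isqrt); fuel only makes the loop total
-- (x strictly decreases each iteration, so m.toNat + 1 steps always suffice).
def isqrtLoop : Nat → Int → Int → Int → Int
  | 0, _, x, _ => x
  | fuel + 1, m, x, y =>
      if y < x then isqrtLoop fuel m y ((y + PySem.Int.floordiv m y) / 2) else x

def isqrtB (m : Int) : Int :=
  isqrtLoop (m.toNat + 1) m m (PySem.Int.floordiv (m + 1) 2)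

def find_nth_term_alt (n : Int) : String :=
  if n ≤ 1 then
    ((PySem.Str.pyGet? "abcdefghijklmnopqrstuvwxyz" 0).map (fun c => String.mk [c])).getD ""
  else
    let k := PySem.Int.floordiv (isqrtB (8 * n - 7) + 1) 2
    ((PySem.Str.pyGet? "abcdefghijklmnopqrstuvwxyz" (k - 1)).map (fun c => String.mk [c])).getD ""

-- ===== PRECONDITION & SPEC =====
-- Pre_ excludes exactly the inputs n > 351 on which A (and B) raise IndexError
-- (the 26-letter alphabet is exhausted).
def Pre_find_nth_term (n : Int) : Prop := n ≤ 351
instance (n : Int) : Decidable (Pre_find_nth_term n) := by unfold Pre_find_nth_term; infer_instance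
def pvWitness_find_nth_term : Int := (17)

def Spec_find_nth_term (n : Int) (out : String) : Prop := out = find_nth_term_alt n
instance (n : Int) (out : String) : Decidable (Spec_find_nth_term n out) := by unfold Spec_find_nth_term; infer_instance

-- ===== CLAIM (what is proved, stated in full; the proofs are below) =====
def Claim_equal_find_nth_term : Prop := ∀ (n : Int), Dom_find_nth_term n → Pre_find_nth_term n → Spec_find_nth_term n (find_nth_term n)

-- ===== LEMMAS AND PROOFS =====

-- For n ≤ 1 both sides return "a".
theorem findLoopA_base (fuel : Nat) (n count i : Int) (h : ¬ n > count) :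
    findLoopA fuel n count i = i := by
  cases fuel <;> simp [findLoopA, h]

theorem eq_low (n : Int) (h : n ≤ 1) :
    find_nth_term n = find_nth_term_alt n := by
  unfold find_nth_term find_nth_term_alt
  rw [findLoopA_base _ n 1 0 (by omega)]
  simp [h]

-- The finitely many remaining admitted inputs 2 ≤ n ≤ 351, checked by evaluation.
set_option maxRecDepth 10000 in
theorem eq_mid : ∀ n ∈ Finset.Icc (2 : Int) 351,
    find_nth_term n = find_nth_term_alt n := by decide

-- ===== VERDICT (by name: the statement is the Claim_ definition above) =====
theorem find_nth_term_spec : Claim_equal_find_nth_term := by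
  intro n _ hpre
  unfold Spec_find_nth_term
  by_cases h : n ≤ 1
  · exact (eq_low n h).symm ▸ rfl
  · exact (eq_mid n (Finset.mem_Icc.mpr ⟨by omega, hpre⟩)).symm ▸ rfl
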